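-- pv_equiv track=rewrite | github.com/neM0s/books | most_common_word.py | most_common_chr
-- ===== SOURCE A (Python) =====
-- def most_common_chr(inp_str):
--     count = 0
--     winner = ""
--     new_str = inp_str.lower()
--     new_str= new_str.replace(" ","")
--     for i in new_str:
--         if new_str.count(i) >= count:
--             count = new_str.count(i)
--             winner = i
--     return winner
-- ===== SOURCE B (Python) =====
-- def most_common_chr(inp_str):
--     s = inp_str.lower().replace(" ", "")
--     freq = {}
--     for ch in s:
--         freq[ch] = freq.get(ch, 0) + 1
--     best = 0
--     for v in freq.values():
--         if v > best:
--             best = v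
--     for ch in reversed(s):
--         if freq[ch] == best:
--             return ch
--     return ""
-- ===== Notes on version B (the rewrite author's own statement) =====
-- stated objective: faster
-- what changed: Replaces A's running-max loop that rescans the whole string with str.count on every character by a single frequency-dict build, one pass over its values for the maximum, and one reverse scan returning the first (i.e. last-occurring) character with maximal count.
import Mathlib
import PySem

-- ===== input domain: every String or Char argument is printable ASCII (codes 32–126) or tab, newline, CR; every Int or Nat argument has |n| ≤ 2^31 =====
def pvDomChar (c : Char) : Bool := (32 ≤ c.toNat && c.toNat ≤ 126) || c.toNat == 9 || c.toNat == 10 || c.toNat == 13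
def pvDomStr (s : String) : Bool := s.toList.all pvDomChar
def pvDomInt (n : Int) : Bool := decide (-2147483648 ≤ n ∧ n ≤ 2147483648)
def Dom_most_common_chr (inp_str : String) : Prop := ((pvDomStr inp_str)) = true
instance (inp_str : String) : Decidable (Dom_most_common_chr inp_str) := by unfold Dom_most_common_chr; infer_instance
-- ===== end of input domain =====

-- B replaces A's running-max loop (which rescans the string with str.count at every character)
-- by one frequency-dict build, a max over its values and one reverse scan.

-- ===== PORT A =====
def most_common_chr (inp_str : String) : String :=
  let new_str := PySem.Str.replace (PySem.Str.lower inp_str) " " ""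
  let res := new_str.toList.foldl
    (fun (st : Int × String) i =>
      if ((PySem.Chars.count new_str.toList [i] : Nat) : Int) ≥ st.1 then
        (((PySem.Chars.count new_str.toList [i] : Nat) : Int), String.mk [i])
      else st) (0, "")
  res.2

-- ===== PORT B =====
def most_common_chr_alt (inp_str : String) : String :=
  let s := PySem.Str.replace (PySem.Str.lower inp_str) " " ""
  let freq : PySem.Dict Char Int :=
    s.toList.foldl (fun d ch => d.insert ch (d.getD ch 0 + 1)) (PySem.Dict.empty : PySem.Dict Char Int)
  let best : Int := freq.values.foldl (fun b v => if v > b then v else b) 0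
  -- freq[ch]: every ch of the reverse scan is a key of freq, so Python's lookup cannot raise; getD is exact here
  match s.toList.reverse.find? (fun ch => freq.getD ch 0 == best) with
  | some ch => String.mk [ch]
  | none => ""

-- ===== PRECONDITION & SPEC =====
def Spec_most_common_chr (inp_str : String) (out : String) : Prop := out = most_common_chr_alt inp_str
instance (inp_str : String) (out : String) : Decidable (Spec_most_common_chr inp_str out) := by unfold Spec_most_common_chr; infer_instance

-- ===== CLAIM (what is proved, stated in full; the proofs are below) =====
def Claim_equal_most_common_chr : Prop := ∀ (inp_str : String), Dom_most_common_chr inp_str → Spec_most_common_chr inp_str (most_common_chr inp_str)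

-- ===== LEMMAS AND PROOFS =====

-- Python's s.count(c) for a single character is the character count
theorem pv_go_singleton (c : Char) (l : List Char) : ∀ (fuel acc : Nat), l.length ≤ fuel →
    PySem.Chars.count.go [c] fuel l acc = acc + l.count c := by
  induction l with
  | nil => intro fuel acc _; cases fuel <;> simp [PySem.Chars.count.go]
  | cons h t ih =>
    intro fuel acc hf
    cases fuel with
    | zero => simp at hf
    | succ f =>
      rw [PySem.Chars.count.go]
      by_cases hc : h = c
      · subst hc
        simp [List.isPrefixOf, ih f (acc + 1) (by simpa using hf)]
        omega
      · simp [List.isPrefixOf, hc, ih f acc (by simpa using hf), Ne.symm hc]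

theorem pv_count_singleton (cs : List Char) (c : Char) : PySem.Chars.count cs [c] = cs.count c := by
  simp [PySem.Chars.count, pv_go_singleton c cs cs.length 0 le_rfl]

-- the running-max step of both programs, on Int
def pvMax (b v : Int) : Int := if v > b then v else b

theorem pvMax_of_ge (b v : Int) (h : b ≤ v) : pvMax b v = v := by unfold pvMax; split_ifs <;> omega
theorem pvMax_of_lt (b v : Int) (h : v < b) : pvMax b v = b := by unfold pvMax; split_ifs <;> omega
theorem le_pvMax_left (b v : Int) : b ≤ pvMax b v := by unfold pvMax; split_ifs <;> omega
theorem le_pvMax_right (b v : Int) : v ≤ pvMax b v := by unfold pvMax; split_ifs <;> omega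

theorem pv_vfold_mem (xs : List Int) : ∀ b : Int, xs.foldl pvMax b ∈ b :: xs := by
  induction xs with
  | nil => simp
  | cons x t ih =>
    intro b
    simp only [List.foldl_cons]
    rcases List.mem_cons.mp (ih (pvMax b x)) with h | h
    · rw [h]; unfold pvMax; split_ifs <;> simp
    · simp [h]

theorem pv_vfold_ub (xs : List Int) : ∀ b : Int, b ≤ xs.foldl pvMax b ∧ ∀ v ∈ xs, v ≤ xs.foldl pvMax b := by
  induction xs with
  | nil => simp
  | cons x t ih =>
    intro b
    simp only [List.foldl_cons]
    obtain ⟨h1, h2⟩ := ih (pvMax b x)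
    refine ⟨le_trans (le_pvMax_left b x) h1, ?_⟩
    intro v hv
    rcases List.mem_cons.mp hv with h | h
    · rw [h]; exact le_trans (le_pvMax_right b x) h1
    · exact h2 v h

theorem pv_vfold_eq (xs ys : List Int) (h : ∀ v, v ∈ xs ↔ v ∈ ys) :
    xs.foldl pvMax 0 = ys.foldl pvMax 0 := by
  have le : ∀ (as bs : List Int), (∀ v, v ∈ as ↔ v ∈ bs) →
      as.foldl pvMax 0 ≤ bs.foldl pvMax 0 := by
    intro as bs hab
    rcases List.mem_cons.mp (pv_vfold_mem as 0) with h0 | hm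
    · rw [h0]; exact (pv_vfold_ub bs 0).1
    · exact (pv_vfold_ub bs 0).2 _ ((hab _).mp hm)
  exact le_antisymm (le xs ys h) (le ys xs (fun v => (h v).symm))

-- characterisation of A's running-max loop: final count is the max of the full counts,
-- final winner is the last character (first of the reverse) whose count equals that max
theorem pv_foldA (f : Char → Int) (l : List Char) :
    l.foldl (fun (st : Int × String) i => if f i ≥ st.1 then (f i, String.mk [i]) else st) (0, "") =
    ((l.map f).foldl pvMax 0,
      match l.reverse.find? (fun c => f c == (l.map f).foldl pvMax 0) with
      | some c => String.mk [c]
      | none => "") := by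
  induction l using List.reverseRecOn with
  | nil => simp
  | append_singleton l a ih =>
    rw [List.foldl_append, ih]
    have hMfold : ((l ++ [a]).map f).foldl pvMax 0 = pvMax ((l.map f).foldl pvMax 0) (f a) := by
      simp
    by_cases h : f a ≥ (l.map f).foldl pvMax 0
    · have h1 : pvMax ((l.map f).foldl pvMax 0) (f a) = f a := pvMax_of_ge _ _ h
      simp [h1, h]
    · have h1 : pvMax ((l.map f).foldl pvMax 0) (f a) = (l.map f).foldl pvMax 0 :=
        pvMax_of_lt _ _ (by omega)
      have hne : (f a == (l.map f).foldl pvMax 0) = false := by simp; omega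
      simp [h1, h, hne]

-- B's best over the dict's values is the same max
theorem pv_best_eq (cs : List Char) :
    (PySem.Dict.counter cs).values.foldl pvMax 0 = (cs.map (fun c => (cs.count c : Int))).foldl pvMax 0 := by
  apply pv_vfold_eq
  intro v
  constructor
  · intro hv
    simp only [PySem.Dict.values, PySem.Dict.items_counter, List.map_map, List.mem_map] at hv
    obtain ⟨c, hc, hvc⟩ := hv
    exact List.mem_map.mpr ⟨c, (PySem.Set.mem_ofList _ _).mp hc, by simpa using hvc⟩
  · intro hv
    obtain ⟨c, hc, hvc⟩ := List.mem_map.mp hv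
    simp only [PySem.Dict.values, PySem.Dict.items_counter, List.map_map, List.mem_map]
    exact ⟨c, (PySem.Set.mem_ofList _ _).mpr hc, by simpa using hvc⟩

-- the two programs agree on any processed character list
theorem pv_main (cs : List Char) :
    (cs.foldl
      (fun (st : Int × String) i =>
        if ((PySem.Chars.count cs [i] : Nat) : Int) ≥ st.1 then
          (((PySem.Chars.count cs [i] : Nat) : Int), String.mk [i])
        else st) (0, "")).2 =
    (match cs.reverse.find?
        (fun ch => (cs.foldl (fun d ch => d.insert ch (d.getD ch 0 + 1)) (PySem.Dict.empty : PySem.Dict Char Int)).getD ch 0 ==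
          (cs.foldl (fun d ch => d.insert ch (d.getD ch 0 + 1)) (PySem.Dict.empty : PySem.Dict Char Int)).values.foldl
            (fun b v => if v > b then v else b) 0) with
      | some ch => String.mk [ch]
      | none => "") := by
  have hfold : (fun (b v : Int) => if v > b then v else b) = pvMax := rfl
  have h2 : (fun ch => (cs.foldl (fun d ch => d.insert ch (d.getD ch 0 + 1)) (PySem.Dict.empty : PySem.Dict Char Int)).getD ch 0 ==
        (cs.foldl (fun d ch => d.insert ch (d.getD ch 0 + 1)) (PySem.Dict.empty : PySem.Dict Char Int)).values.foldl
          (fun b v => if v > b then v else b) 0) =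
      (fun c => (((cs.count c : Nat) : Int) == (cs.map (fun c => (cs.count c : Int))).foldl pvMax 0)) := by
    funext c
    rw [PySem.Dict.foldl_insert_getD_add_one_eq_counter, hfold, PySem.Dict.getD_counter, pv_best_eq cs]
  rw [h2]
  simp only [pv_count_singleton]
  rw [pv_foldA (fun c => (cs.count c : Int)) cs]

-- ===== VERDICT (by name: the statement is the Claim_ definition above) =====
theorem most_common_chr_spec : Claim_equal_most_common_chr := by
  intro inp_str _
  show most_common_chr inp_str = most_common_chr_alt inp_str
  simp only [most_common_chr, most_common_chr_alt]
  exact pv_main ((PySem.Str.replace (PySem.Str.lower inp_str) " " "").toList)
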